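-- pv_equiv track=rewrite | github.com/samienda/contests | D_Quadruplet_Matrix.py | func
-- ===== SOURCE A (Python) =====
-- from copy import deepcopy
--
-- def func(n, mat):
--     temp = [[0, 0], [ n - 1, 0], [ 0, n- 1] ,  [n - 1, n - 1]]
--     updatein = [[0, 1], [-1, 0], [1, 0], [0, -1] ]
--     updateout = [[1, 1], [-1, 1], [1, -1], [-1, -1]]
--
--     oper = 0
--     direction = deepcopy(temp)
--     for _ in range(n//2):
--
--         while direction[0][1] < direction[2][1] and direction[0][0] < direction[1][0] and direction[2][0] < direction[3][0] and direction[1][1] < direction[3][1]: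
--             dic = [0, 0]
--             for k in range(4):
--                 x = direction[k]
--
--                 val = mat[x[0]][x[1]]
--                 dic[val] += 1
--
--             oper += min(dic)
--
--
--             for i in range(4):
--                 direction[i][0] += updatein[i][0]
--                 direction[i][1] += updatein[i][1]
--
--         for j in range(4):
--             temp[j][0] += updateout[j][0]
--             temp[j][1] += updateout[j][1]
--         direction = deepcopy(temp)
--
--     return oper
-- ===== SOURCE B (Python) =====
-- def func(n, mat):
--     # Recursive ring peeling: price the outermost ring's rotation orbits, then
--     # recurse on the sliced-out (n-2)x(n-2) inner submatrix.
--     if n < 2: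
--         return 0
--     cost = 0
--     for j in range(n - 1):
--         cnt = [0, 0]
--         for v in (mat[0][j], mat[n - 1 - j][0], mat[j][n - 1], mat[n - 1][n - 1 - j]):
--             cnt[v] += 1
--         cost += min(cnt)
--     inner = [row[1:n - 1] for row in mat[1:n - 1]]
--     return cost + func(n - 2, inner)
-- ===== Notes on version B (the rewrite author's own statement) =====
-- stated objective: alternative
-- what changed: A walks four marching pointers with deepcopy'd corner state and direction vectors over a fixed matrix; B is a recursion that prices only the outermost ring and recurses on the sliced-out (n-2)x(n-2) inner submatrix, so all indexing is ring-0 indexing on shrinking matrices.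
import Mathlib
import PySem

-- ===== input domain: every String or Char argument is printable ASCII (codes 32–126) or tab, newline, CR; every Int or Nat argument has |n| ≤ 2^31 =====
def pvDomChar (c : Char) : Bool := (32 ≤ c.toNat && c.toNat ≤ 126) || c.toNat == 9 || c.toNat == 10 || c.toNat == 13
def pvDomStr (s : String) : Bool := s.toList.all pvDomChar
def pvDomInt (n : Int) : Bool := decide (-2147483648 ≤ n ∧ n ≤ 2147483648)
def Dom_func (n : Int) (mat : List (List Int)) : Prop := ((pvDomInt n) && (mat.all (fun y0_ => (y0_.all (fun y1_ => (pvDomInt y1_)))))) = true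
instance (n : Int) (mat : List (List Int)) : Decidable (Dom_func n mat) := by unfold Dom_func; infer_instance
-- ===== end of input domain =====

-- B replaces A's iterative four-pointer ring walk (deepcopy'd corner state, a 4-condition
-- while loop, marching direction vectors) by a recursion that prices only the OUTERMOST
-- ring and then recurses on the sliced-out (n-2)x(n-2) inner submatrix; objective: simpler.

-- ===== PORT A =====
-- mat[x][y]; indices are in range on Pre_-admitted inputs, the default is never used there
def pvCell (mat : List (List Int)) (x y : Int) : Int :=
  (PySem.List.pyGet? ((PySem.List.pyGet? mat x).getD []) y).getD 0

-- Python 'cnt[val] += 1' on a 2-list: val 0 or -2 hits index 0, val 1 or -1 hits index 1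
-- (negative-index wraparound); any other val raises IndexError (outside Pre_).
def pvBump (c : Int × Int) (v : Int) : Int × Int :=
  if v = 0 ∨ v = -2 then (c.1 + 1, c.2) else if v = 1 ∨ v = -1 then (c.1, c.2 + 1) else c

-- the inner 'while' of A: four pointers d0..d3, body unrolled k = 0..3 in order
def pvWhileA (mat : List (List Int)) (d0 d1 d2 d3 : Int × Int) (oper : Int) : Int :=
  if _h : d0.2 < d2.2 ∧ d0.1 < d1.1 ∧ d2.1 < d3.1 ∧ d1.2 < d3.2 then
    let dic := pvBump (pvBump (pvBump (pvBump (0, 0)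
      (pvCell mat d0.1 d0.2)) (pvCell mat d1.1 d1.2)) (pvCell mat d2.1 d2.2)) (pvCell mat d3.1 d3.2)
    pvWhileA mat (d0.1, d0.2 + 1) (d1.1 - 1, d1.2) (d2.1 + 1, d2.2) (d3.1, d3.2 - 1)
      (oper + min dic.1 dic.2)
  else oper
termination_by (d2.2 - d0.2).toNat
decreasing_by omega

def func (n : Int) (mat : List (List Int)) : Int :=
  ((PySem.List.pyRange 0 (PySem.Int.floordiv n 2) 1).foldl
    (fun st _ =>
      let t := st.1
      let oper := pvWhileA mat t.1 t.2.1 t.2.2.1 t.2.2.2 st.2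
      -- 'temp[j] += updateout[j]' for j = 0..3, then direction = deepcopy(temp)
      (((t.1.1 + 1, t.1.2 + 1), (t.2.1.1 - 1, t.2.1.2 + 1),
        (t.2.2.1.1 + 1, t.2.2.1.2 - 1), (t.2.2.2.1 - 1, t.2.2.2.2 - 1)), oper))
    (((0, 0), (n - 1, 0), (0, n - 1), (n - 1, n - 1)), 0)).2

-- ===== PORT B =====
-- cost of one rotation orbit: count the 4 rotational images of (i,j), take the cheaper side
def pvOrb (mat : List (List Int)) (n i j : Int) : Int :=
  let cnt := pvBump (pvBump (pvBump (pvBump (0, 0)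
    (pvCell mat i j)) (pvCell mat (n - 1 - j) i)) (pvCell mat j (n - 1 - i))) (pvCell mat (n - 1 - i) (n - 1 - j))
  min cnt.1 cnt.2

-- '[row[1:n-1] for row in mat[1:n-1]]'
def pvInner (n : Int) (mat : List (List Int)) : List (List Int) :=
  (PySem.List.slice mat (some 1) (some (n - 1))).map
    (fun row => PySem.List.slice row (some 1) (some (n - 1)))

def func_alt (n : Int) (mat : List (List Int)) : Int :=
  if _h : n < 2 then 0
  else
    ((PySem.List.pyRange 0 (n - 1) 1).foldl (fun c j => c + pvOrb mat n 0 j) 0)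
      + func_alt (n - 2) (pvInner n mat)
termination_by n.toNat
decreasing_by omega

-- ===== PRECONDITION & SPEC =====
-- Pre_ is exactly where A returns: for n ≥ 2 A visits every cell of the n×n top-left block
-- except the centre of an odd n, so it raises IndexError unless mat has at least n rows of
-- length at least n with those visited values in [-2, 1] (Python's 2-list index range).
def Pre_func (n : Int) (mat : List (List Int)) : Prop :=
  2 ≤ n →
    (n ≤ (mat.length : Int) ∧
      ∀ i : Nat, i < n.toNat →
        (n ≤ ((mat.getD i []).length : Int) ∧
          ∀ j : Nat, j < n.toNat → ¬((i : Int) = (j : Int) ∧ 2 * (i : Int) + 1 = n) →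
            (-2 ≤ (mat.getD i []).getD j 0 ∧ (mat.getD i []).getD j 0 ≤ 1)))
instance (n : Int) (mat : List (List Int)) : Decidable (Pre_func n mat) := by
  unfold Pre_func; infer_instance

def pvWitness_func : Int × List (List Int) := (3, [[0, 1, 0], [1, 0, 1], [0, 1, 0]])

def Spec_func (n : Int) (mat : List (List Int)) (out : Int) : Prop := out = func_alt n mat
instance (n : Int) (mat : List (List Int)) (out : Int) : Decidable (Spec_func n mat out) := by
  unfold Spec_func; infer_instance

-- ===== CLAIM (what is proved, stated in full; the proofs are below) =====
def Claim_equal_func : Prop := ∀ (n : Int) (mat : List (List Int)), Dom_func n mat → Pre_func n mat → Spec_func n mat (func n mat)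

-- ===== LEMMAS AND PROOFS =====

-- common reference: the plain double fold 'for i in range(n//2): for j in range(i, n-1-i)'
def pvG (n : Int) (mat : List (List Int)) : Int :=
  (PySem.List.pyRange 0 (PySem.Int.floordiv n 2) 1).foldl
    (fun total i =>
      (PySem.List.pyRange i (n - 1 - i) 1).foldl
        (fun t j => t + pvOrb mat n i j) total)
    0

-- ---- A = pvG ----

-- A's while loop started on ring r at column j computes the inner fold over range(j, n-1-r).
lemma while_eq (mat : List (List Int)) (n r : Int) :
    ∀ j oper, pvWhileA mat (r, j) (n - 1 - j, r) (j, n - 1 - r) (n - 1 - r, n - 1 - j) oper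
      = (PySem.List.pyRange j (n - 1 - r) 1).foldl (fun t jj => t + pvOrb mat n r jj) oper := by
  intro j
  induction hk : (n - 1 - r - j).toNat generalizing j with
  | zero =>
    intro oper
    rw [pvWhileA, PySem.List.pyRange_one_eq_nil (by omega)]
    rw [dif_neg (by simp only; omega)]
    rfl
  | succ k ih =>
    intro oper
    rw [pvWhileA, PySem.List.pyRange_one_cons (by omega)]
    rw [dif_pos (by simp only; omega)]
    simp only [List.foldl_cons]
    have := ih (j + 1) (by omega)
    rw [show (n - 1 - j - 1 : Int) = n - 1 - (j + 1) by ring] at *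
    exact this (oper + pvOrb mat n r j)

-- the outer fold: from ring a with temp at ring-a corners, A accumulates pvG's outer fold
lemma outer_eq (mat : List (List Int)) (n m : Int) :
    ∀ a oper, ((PySem.List.pyRange a m 1).foldl
      (fun st _ =>
        let t := st.1
        let oper := pvWhileA mat t.1 t.2.1 t.2.2.1 t.2.2.2 st.2
        (((t.1.1 + 1, t.1.2 + 1), (t.2.1.1 - 1, t.2.1.2 + 1),
          (t.2.2.1.1 + 1, t.2.2.1.2 - 1), (t.2.2.2.1 - 1, t.2.2.2.2 - 1)), oper))
      (((a, a), (n - 1 - a, a), (a, n - 1 - a), (n - 1 - a, n - 1 - a)), oper)).2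
    = (PySem.List.pyRange a m 1).foldl
        (fun total i => (PySem.List.pyRange i (n - 1 - i) 1).foldl
          (fun t j => t + pvOrb mat n i j) total) oper := by
  intro a
  induction hk : (m - a).toNat generalizing a with
  | zero =>
    intro oper
    rw [PySem.List.pyRange_one_eq_nil (by omega)]
    rfl
  | succ k ih =>
    intro oper
    rw [PySem.List.pyRange_one_cons (by omega)]
    simp only [List.foldl_cons]
    have hw := while_eq mat n a a oper
    have := ih (a + 1) (by omega)
    simp only at this ⊢
    rw [hw]
    rw [show (n - 1 - a - 1 : Int) = n - 1 - (a + 1) by ring]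
    exact this _

lemma func_eq_G (n : Int) (mat : List (List Int)) : func n mat = pvG n mat := by
  unfold func pvG
  have := outer_eq mat n (PySem.Int.floordiv n 2) 0 0
  simpa using this

-- ---- B = pvG ----

-- a cell of the sliced-out inner submatrix is the corresponding shifted cell of mat
lemma cell_inner (n : Int) (mat : List (List Int)) (x y : Int)
    (hx0 : 0 ≤ x) (hx1 : x ≤ n - 3) (hy0 : 0 ≤ y) (hy1 : y ≤ n - 3) :
    pvCell (pvInner n mat) x y = pvCell mat (x + 1) (y + 1) := by
  obtain ⟨a, rfl⟩ : ∃ a : Nat, x = (a : Int) := ⟨x.toNat, (Int.toNat_of_nonneg hx0).symm⟩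
  obtain ⟨b, rfl⟩ : ∃ b : Nat, y = (b : Int) := ⟨y.toNat, (Int.toNat_of_nonneg hy0).symm⟩
  have hn : (3 : Int) ≤ n := by omega
  have h1 : PySem.List.slice mat (some 1) (some (n - 1))
      = (mat.drop 1).take ((n - 1).toNat - 1) :=
    PySem.List.slice_toNat mat (by omega) (by omega)
  unfold pvCell pvInner
  rw [h1]
  have ha : a < (n - 1).toNat - 1 := by omega
  have hcast : ((a : Int) + 1) = ((a + 1 : Nat) : Int) := by push_cast; ring
  have hcastb : ((b : Int) + 1) = ((b + 1 : Nat) : Int) := by push_cast; ring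
  rw [hcast, hcastb]
  simp only [PySem.List.pyGet?_natCast, List.getElem?_map, List.getElem?_take, List.getElem?_drop]
  rw [if_pos ha]
  cases hrow : mat[1 + a]? with
  | none =>
    have : mat[a + 1]? = none := by rw [Nat.add_comm a 1]; exact hrow
    simp [this]
  | some row =>
    have : mat[a + 1]? = some row := by rw [Nat.add_comm a 1]; exact hrow
    simp only [this, Option.map_some, Option.getD_some]
    have h2 : PySem.List.slice row (some 1) (some (n - 1))
        = (row.drop 1).take ((n - 1).toNat - 1) :=
      PySem.List.slice_toNat row (by omega) (by omega)
    rw [h2]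
    simp only [List.getElem?_take, List.getElem?_drop]
    rw [if_pos (by omega : b < (n - 1).toNat - 1)]
    rw [Nat.add_comm 1 b]

-- an orbit of the inner submatrix is the shifted orbit of mat
lemma orb_inner (n : Int) (mat : List (List Int)) (i j : Int)
    (hi : 0 ≤ i) (hij : i ≤ j) (hj : j < n - 3 - i) :
    pvOrb (pvInner n mat) (n - 2) i j = pvOrb mat n (i + 1) (j + 1) := by
  unfold pvOrb
  rw [show (n - 2 - 1 - j : Int) = n - 3 - j by ring,
      show (n - 2 - 1 - i : Int) = n - 3 - i by ring,
      show (n - 1 - (j + 1) : Int) = n - 3 - j + 1 by ring,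
      show (n - 1 - (i + 1) : Int) = n - 3 - i + 1 by ring]
  rw [cell_inner n mat i j hi (by omega) (by omega) (by omega),
      cell_inner n mat (n - 3 - j) i (by omega) (by omega) hi (by omega),
      cell_inner n mat j (n - 3 - i) (by omega) (by omega) (by omega) (by omega),
      cell_inner n mat (n - 3 - i) (n - 3 - j) (by omega) (by omega) (by omega) (by omega)]

-- ring sums shift: ring i+1 of mat is ring i of the inner submatrix
lemma ring_shift (n : Int) (mat : List (List Int)) (i : Int) (hi : 0 ≤ i) :
    ∀ j, i ≤ j →
      ((PySem.List.pyRange (j + 1) (n - 2 - i) 1).map (pvOrb mat n (i + 1))).sum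
      = ((PySem.List.pyRange j (n - 3 - i) 1).map (pvOrb (pvInner n mat) (n - 2) i)).sum := by
  intro j
  induction hk : (n - 3 - i - j).toNat generalizing j with
  | zero =>
    intro hij
    rw [PySem.List.pyRange_one_eq_nil (by omega), PySem.List.pyRange_one_eq_nil (by omega)]
    simp
  | succ k ih =>
    intro hij
    conv_rhs => rw [PySem.List.pyRange_one_cons (by omega : j < n - 3 - i)]
    conv_lhs => rw [PySem.List.pyRange_one_cons (by omega : j + 1 < n - 2 - i)]
    simp only [List.map_cons, List.sum_cons]
    rw [orb_inner n mat i j hi hij (by omega), ih (j + 1) (by omega) (by omega)]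

-- sum of rings 1.. of mat equals sum of rings 0.. of the inner submatrix
lemma rings_shift (n : Int) (mat : List (List Int)) (b : Int) :
    ∀ a, 0 ≤ a →
      ((PySem.List.pyRange (a + 1) b 1).map
        (fun i => ((PySem.List.pyRange i (n - 1 - i) 1).map (pvOrb mat n i)).sum)).sum
      = ((PySem.List.pyRange a (b - 1) 1).map
        (fun i => ((PySem.List.pyRange i (n - 2 - 1 - i) 1).map (pvOrb (pvInner n mat) (n - 2) i)).sum)).sum := by
  intro a
  induction hk : (b - 1 - a).toNat generalizing a with
  | zero =>
    intro ha
    rw [PySem.List.pyRange_one_eq_nil (by omega), PySem.List.pyRange_one_eq_nil (by omega)]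
    simp
  | succ k ih =>
    intro ha
    conv_rhs => rw [PySem.List.pyRange_one_cons (by omega : a < b - 1)]
    conv_lhs => rw [PySem.List.pyRange_one_cons (by omega : a + 1 < b)]
    simp only [List.map_cons, List.sum_cons]
    rw [show (n - 1 - (a + 1) : Int) = n - 2 - a by ring,
        show (n - 2 - 1 - a : Int) = n - 3 - a by ring]
    rw [ring_shift n mat a ha a le_rfl, ih (a + 1) (by omega) (by omega)]

lemma floordiv_sub_two (n : Int) (_h : 2 ≤ n) :
    PySem.Int.floordiv (n - 2) 2 = PySem.Int.floordiv n 2 - 1 := by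
  have h2 := (PySem.Int.floordiv_eq_iff_of_pos (a := n) (b := 2)
    (q := PySem.Int.floordiv n 2) (by omega)).1 rfl
  exact (PySem.Int.floordiv_eq_iff_of_pos (a := n - 2) (b := 2)
    (q := PySem.Int.floordiv n 2 - 1) (by omega)).2 (by omega)

lemma pvG_sum (n : Int) (mat : List (List Int)) :
    pvG n mat = ((PySem.List.pyRange 0 (PySem.Int.floordiv n 2) 1).map
      (fun i => ((PySem.List.pyRange i (n - 1 - i) 1).map (pvOrb mat n i)).sum)).sum := by
  unfold pvG
  simp only [PySem.List.foldl_add]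
  simp

lemma alt_eq_G (n : Int) (mat : List (List Int)) : func_alt n mat = pvG n mat := by
  induction hk : n.toNat using Nat.strong_induction_on generalizing n mat with
  | _ k ih =>
    by_cases h : n < 2
    · rw [func_alt, dif_pos h, pvG]
      rw [PySem.List.pyRange_one_eq_nil]
      · rfl
      · have := (PySem.Int.floordiv_lt_iff_lt_mul (a := n) (b := 2) (q := 1) (by omega)).2 (by omega)
        omega
    · rw [func_alt, dif_neg h]
      have hrec : func_alt (n - 2) (pvInner n mat) = pvG (n - 2) (pvInner n mat) := by
        exact ih (n - 2).toNat (by omega) (n - 2) (pvInner n mat) rfl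
      rw [hrec, pvG_sum, pvG_sum]
      have hfd : 1 ≤ PySem.Int.floordiv n 2 := by
        have := (PySem.Int.le_floordiv_iff_mul_le (a := n) (b := 2) (q := 1) (by omega)).2 (by omega)
        omega
      rw [PySem.List.pyRange_one_cons (by omega : (0 : Int) < PySem.Int.floordiv n 2)]
      simp only [List.map_cons, List.sum_cons]
      rw [floordiv_sub_two n (by omega)]
      rw [show (0 + 1 : Int) = 1 from by ring] at *
      rw [← rings_shift n mat (PySem.Int.floordiv n 2) 0 le_rfl]
      rw [PySem.List.foldl_add]
      rw [show (n - 1 - 0 : Int) = n - 1 by ring]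
      rw [show (0 + 1 : Int) = 1 by ring]
      simp

-- ===== VERDICT (by name: the statement is the Claim_ definition above) =====
theorem func_spec : Claim_equal_func := by
  intro n mat _ _
  unfold Spec_func
  rw [func_eq_G, alt_eq_G]
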